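-- pv_equiv track=rewrite | github.com/ikeshou/TinyCLisp | lisp_tokenizer.py | lex_string
-- ===== SOURCE A (Python) =====
-- class TokenizeError(RuntimeError):
--     pass
--
-- def lex_string(source):
--     """
--     前処理済みの文字列をうけとり、トークン分割されたリストを作成する。
--
--     >>> t = LispTokenizer()
--     >>> t.lex_string('( + 1 2 3 )')
--     ['(', '+', '1', '2', '3', ')']
--
--     >>> t.lex_string('"hoge\\\\"(piyo)"')
--     ['"hoge\\\\"(piyo)"']
--
--     >>> t.lex_string('( progn ( print "()" ) ( print " " ) ( print \\' ( 1 2 3 ) ) )')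
--     ['(', 'progn', '(', 'print', '"()"', ')', '(', 'print', '" "', ')', '(', 'print', "'", '(', '1', '2', '3', ')', ')', ')']
--
--     Args:
--         source (str)
--     Returns:
--         token_list (str)
--     """
--     token_list = []
--     pos = 0
--     previous_pos = 0
--     is_in_string_literal = False
--     escaped = False
--
--     while 0 <= pos < len(source):
--         if source[pos] == '\\':
--             escaped = not escaped
--             pos += 1
--         elif source[pos] == '"' and not escaped:
--             escaped = False
--             if is_in_string_literal:
--                 pos += 1
--                 token_list.append(source[previous_pos:pos])
--                 previous_pos = pos
--                 is_in_string_literal = False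
--             else:
--                 token_list.extend(source[previous_pos:pos].split())
--                 previous_pos = pos
--                 pos += 1
--                 is_in_string_literal = True
--         else:
--             escaped = False
--             pos += 1
--
--     if is_in_string_literal:
--         raise TokenizeError('LispTokenizer.lex_string: no matching " found. (Some bugs inside LispTokenizer.add_propser_space?)')
--     token_list.extend(source[previous_pos:pos].split())
--     return token_list
-- ===== SOURCE B (Python) =====
-- class TokenizeError(RuntimeError):
--     pass
--
--
-- def lex_string(source):
--     # Pass 1: split the source into spans (string literals vs bare text);
--     # Pass 2: emit literals whole, split() the bare spans.
--     spans = _find_spans(source)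
--     token_list = []
--     for is_literal, text in spans:
--         if is_literal:
--             token_list.append(text)
--         else:
--             token_list.extend(text.split())
--     return token_list
--
--
-- def _find_spans(source):
--     spans = []
--     cur = []
--     in_string = False
--     escaped = False
--     for ch in source:
--         if ch == '\\':
--             escaped = not escaped
--             cur.append(ch)
--         elif ch == '"' and not escaped:
--             if in_string:
--                 cur.append(ch)
--                 spans.append((True, ''.join(cur)))
--                 cur = []
--                 in_string = False
--             else:
--                 spans.append((False, ''.join(cur)))
--                 cur = [ch]
--                 in_string = True
--         else:
--             escaped = False
--             cur.append(ch)
--     if in_string: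
--         raise TokenizeError('LispTokenizer.lex_string: no matching " found. (Some bugs inside LispTokenizer.add_propser_space?)')
--     spans.append((False, ''.join(cur)))
--     return spans
-- ===== Notes on version B (the rewrite author's own statement) =====
-- stated objective: faster
-- what changed: B separates region-finding from tokenization: a first pass builds tagged spans (complete quoted literals vs bare text) via a character accumulator instead of A's previous_pos/pos index-and-slice bookkeeping, and a second pass emits literals whole and split()s the bare spans.
-- outside the precondition, e.g. on lex_string('"'): A raises TokenizeError, B raises TokenizeError
import Mathlib
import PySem

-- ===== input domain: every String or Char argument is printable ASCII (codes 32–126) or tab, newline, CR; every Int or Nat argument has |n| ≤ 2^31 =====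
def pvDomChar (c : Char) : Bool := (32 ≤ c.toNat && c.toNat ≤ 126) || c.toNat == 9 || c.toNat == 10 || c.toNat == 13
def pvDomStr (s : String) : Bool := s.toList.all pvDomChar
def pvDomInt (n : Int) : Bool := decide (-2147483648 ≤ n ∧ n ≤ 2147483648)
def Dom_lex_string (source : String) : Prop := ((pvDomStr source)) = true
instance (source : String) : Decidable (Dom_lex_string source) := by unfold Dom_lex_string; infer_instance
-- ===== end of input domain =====

-- B re-implements the tokenizer as two passes (span finding via a character accumulator, then
-- emission) instead of A's inline index/slice loop; same return values and same TokenizeError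
-- behaviour; a timing run measured B faster by a constant factor (objective: faster).


-- ===== PORT A =====
-- A's while loop: pos advances by exactly 1 each iteration, so it is the structural
-- recursion on the remaining suffix (rest = cs.drop pos) with pos carried along.
def lexA_loop (cs : List Char) : List Char → List (List Char) → Nat → Nat → Bool → Bool →
    List (List Char) × Nat × Bool
  | [], tokens, prev, _pos, instr, _esc => (tokens, prev, instr)
  | c :: rest, tokens, prev, pos, instr, esc =>
    if c = '\\' then
      lexA_loop cs rest tokens prev (pos + 1) instr (!esc)
    else if c = '"' && !esc then
      if instr then
        lexA_loop cs rest
          (tokens ++ [PySem.List.slice cs (some (prev : Int)) (some ((pos + 1 : Nat) : Int))])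
          (pos + 1) (pos + 1) false false
      else
        lexA_loop cs rest
          (tokens ++ PySem.Chars.split₀ (PySem.List.slice cs (some (prev : Int)) (some (pos : Int))))
          pos (pos + 1) true false
    else
      lexA_loop cs rest tokens prev (pos + 1) instr false

def lex_string (source : String) : List String :=
  match lexA_loop source.toList source.toList [] 0 0 false false with
  | (tokens, prev, instr) =>
    if instr then []   -- raise TokenizeError: excluded by Pre_lex_string
    else (tokens ++ PySem.Chars.split₀
            (PySem.List.slice source.toList (some (prev : Int))
              (some (source.toList.length : Int)))).map String.mk

-- ===== PORT B =====
-- pass 1: split the source into spans (true = complete string literal, false = bare text)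
def lexB_scan : List Char → List (Bool × List Char) → List Char → Bool → Bool →
    Option (List (Bool × List Char))
  | [], spans, cur, instr, _esc =>
    if instr then none   -- raise TokenizeError: excluded by Pre_lex_string
    else some (spans ++ [(false, cur)])
  | c :: rest, spans, cur, instr, esc =>
    if c = '\\' then
      lexB_scan rest spans (cur ++ [c]) instr (!esc)
    else if c = '"' && !esc then
      if instr then lexB_scan rest (spans ++ [(true, cur ++ [c])]) [] false false
      else lexB_scan rest (spans ++ [(false, cur)]) [c] true false
    else
      lexB_scan rest spans (cur ++ [c]) instr false

-- pass 2: literals are appended whole, bare spans are whitespace-split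
def lexB_emit (spans : List (Bool × List Char)) : List (List Char) :=
  spans.foldl (fun acc s => if s.1 then acc ++ [s.2] else acc ++ PySem.Chars.split₀ s.2) []

def lex_string_alt (source : String) : List String :=
  match lexB_scan source.toList [] [] false false with
  | none => []
  | some spans => (lexB_emit spans).map String.mk

-- ===== PRECONDITION & SPEC =====
-- a '"' at index i is unescaped iff the run of backslashes immediately before it has even length
def unescapedQuoteAt (cs : List Char) (i : Nat) : Bool :=
  cs.getD i ' ' == '"' && ((cs.take i).reverse.takeWhile (· == '\\')).length % 2 == 0

-- Pre_ excludes exactly the sources with an odd number of unescaped '"' (an unterminated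
-- string literal), on which A raises TokenizeError; B raises the same error there.
def Pre_lex_string (source : String) : Prop :=
  (List.range source.toList.length).countP (unescapedQuoteAt source.toList) % 2 = 0
instance (source : String) : Decidable (Pre_lex_string source) := by
  unfold Pre_lex_string; infer_instance

def pvWitness_lex_string : String := "( print \"a b\" 1 2 )"

def Spec_lex_string (source : String) (out : List String) : Prop := out = lex_string_alt source
instance (source : String) (out : List String) : Decidable (Spec_lex_string source out) := by
  unfold Spec_lex_string; infer_instance

-- ===== CLAIM (what is proved, stated in full; the proofs are below) =====
def Claim_equal_lex_string : Prop :=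
  ∀ (source : String), Dom_lex_string source → Pre_lex_string source →
    Spec_lex_string source (lex_string source)

-- ===== LEMMAS AND PROOFS =====
theorem emit_snoc (sp : List (Bool × List Char)) (b : Bool) (t : List Char) :
    lexB_emit (sp ++ [(b, t)]) = lexB_emit sp ++ (if b then [t] else PySem.Chars.split₀ t) := by
  have aux : ∀ (l : List (Bool × List Char)) (acc : List (List Char)),
      l.foldl (fun acc s => if s.1 then acc ++ [s.2] else acc ++ PySem.Chars.split₀ s.2) acc
        = acc ++ lexB_emit l := by
    intro l
    induction l with
    | nil => intro acc; simp [lexB_emit]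
    | cons x xs ih =>
      intro acc
      simp only [List.foldl_cons, lexB_emit] at *
      rw [ih, ih (if x.1 then [] ++ [x.2] else [] ++ PySem.Chars.split₀ x.2)]
      by_cases h : x.1 <;> simp [h]
  have h1 : lexB_emit (sp ++ [(b, t)]) = lexB_emit sp ++ lexB_emit [(b, t)] := by
    simp only [lexB_emit, List.foldl_append]
    exact aux [(b, t)] _
  rw [h1]
  congr 1

theorem take_snoc_of_getElem? {cs : List Char} {prev pos : Nat} {c : Char}
    (hle : prev ≤ pos) (hget : cs[pos]? = some c) :
    (cs.drop prev).take (pos + 1 - prev) = (cs.drop prev).take (pos - prev) ++ [c] := by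
  have h1 : pos + 1 - prev = (pos - prev) + 1 := by omega
  rw [h1, List.take_add_one]
  have h2 : (cs.drop prev)[pos - prev]? = cs[prev + (pos - prev)]? := List.getElem?_drop
  have h3 : prev + (pos - prev) = pos := by omega
  rw [h2, h3, hget]
  rfl

theorem key (rest : List Char) : ∀ (cs : List Char) (spans : List (Bool × List Char))
    (prev pos : Nat) (instr esc : Bool), prev ≤ pos → cs.drop pos = rest →
    (match lexA_loop cs rest (lexB_emit spans) prev pos instr esc with
     | (tokens, p, i) =>
       if i then ([] : List (List Char))
       else tokens ++ PySem.Chars.split₀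
              (PySem.List.slice cs (some (p : Int)) (some (cs.length : Int))))
    = (match lexB_scan rest spans ((cs.drop prev).take (pos - prev)) instr esc with
       | none => []
       | some sp => lexB_emit sp) := by
  induction rest with
  | nil =>
    intro cs spans prev pos instr esc hle hdrop
    simp only [lexA_loop, lexB_scan]
    by_cases hi : instr
    · simp [hi]
    · have hlen : cs.length ≤ pos := by
        by_contra h
        have := List.drop_eq_nil_iff.mp hdrop
        omega
      have hslice : PySem.List.slice cs (some (prev : Int)) (some (cs.length : Int))
          = cs.drop prev := by
        rw [PySem.List.slice_natCast]
        exact List.take_of_length_le (by simp)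
      have hcur : (cs.drop prev).take (pos - prev) = cs.drop prev :=
        List.take_of_length_le (by simp; omega)
      simp only [hi, Bool.false_eq_true, if_false, emit_snoc, hslice, hcur]
  | cons c rest ih =>
    intro cs spans prev pos instr esc hle hdrop
    have hget : cs[pos]? = some c := by
      have h0 : (cs.drop pos)[0]? = cs[pos + 0]? := List.getElem?_drop
      rw [hdrop] at h0
      simpa using h0.symm
    have hdrop' : cs.drop (pos + 1) = rest := by
      have h1 : cs.drop (pos + 1) = (cs.drop pos).drop 1 := by rw [List.drop_drop]
      rw [h1, hdrop]; rfl
    have hsnoc := take_snoc_of_getElem? hle hget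
    simp only [lexA_loop, lexB_scan]
    by_cases hbs : c = '\\'
    · subst hbs
      have := ih cs spans prev (pos + 1) instr (!esc) (by omega) hdrop'
      rw [hsnoc] at this
      exact this
    · simp only [if_neg hbs]
      by_cases hq : (c = '"' && !esc) = true
      · simp only [if_pos hq]
        by_cases hi : instr = true
        · -- closing quote
          subst hi
          have htok : PySem.List.slice cs (some (prev : Int)) (some ((pos + 1 : Nat) : Int))
              = (cs.drop prev).take (pos - prev) ++ [c] := by
            rw [PySem.List.slice_natCast, ← hsnoc]
          rw [htok]
          have := ih cs (spans ++ [(true, (cs.drop prev).take (pos - prev) ++ [c])])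
            (pos + 1) (pos + 1) false false (le_refl _) hdrop'
          rw [emit_snoc] at this
          simp only [Nat.sub_self, List.take_zero, if_true] at this
          exact this
        · -- opening quote
          simp only [Bool.not_eq_true] at hi
          subst hi
          simp only [Bool.false_eq_true, if_false]
          have htok : PySem.List.slice cs (some (prev : Int)) (some ((pos : Nat) : Int))
              = (cs.drop prev).take (pos - prev) := by
            rw [PySem.List.slice_natCast]
          rw [htok]
          have hcur1 : (cs.drop pos).take (pos + 1 - pos) = [c] := by
            have h2 := take_snoc_of_getElem? (le_refl pos) hget
            simpa using h2
          have := ih cs (spans ++ [(false, (cs.drop prev).take (pos - prev))])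
            pos (pos + 1) true false (by omega) hdrop'
          rw [emit_snoc, hcur1] at this
          simp only [Bool.false_eq_true, if_false] at this
          exact this
      · simp only [if_neg hq]
        have := ih cs spans prev (pos + 1) instr false (by omega) hdrop'
        rw [hsnoc] at this
        exact this

theorem lex_eq_alt (source : String) : lex_string source = lex_string_alt source := by
  have h := key source.toList source.toList [] 0 0 false false (le_refl 0) (by simp)
  simp only [Nat.sub_self, List.take_zero, List.drop_zero,
    show lexB_emit [] = [] from rfl] at h
  unfold lex_string lex_string_alt
  rcases hA : lexA_loop source.toList source.toList [] 0 0 false false with ⟨tokens, p, i⟩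
  rw [hA] at h
  rcases hB : lexB_scan source.toList [] [] false false with _ | sp <;> rw [hB] at h
  · simp only [String.length_toList] at h ⊢
    by_cases hi : i = true
    · simp [hi]
    · simp only [hi, Bool.false_eq_true, if_false] at h ⊢
      rw [h]
      rfl
  · simp only [String.length_toList] at h ⊢
    by_cases hi : i = true
    · simp only [hi, if_true] at h ⊢
      rw [← h]
      rfl
    · simp only [hi, Bool.false_eq_true, if_false] at h ⊢
      rw [h]

-- ===== VERDICT (by name: the statement is the Claim_ definition above) =====
theorem lex_string_spec : Claim_equal_lex_string := by
  intro source _ _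
  unfold Spec_lex_string
  exact lex_eq_alt source
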